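-- pv_equiv track=rewrite | github.com/Rishu5kumar/The_Joy_of_Computing-_using_Python | flames.py | remove_common_letters
-- ===== SOURCE A (Python) =====
-- def remove_common_letters(name1, name2):
--     name1 = list(name1)
--     name2 = list(name2)
--     for letter in name1[:]:
--         if letter in name2:
--             name1.remove(letter)
--             name2.remove(letter)
--     return len(name1) + len(name2)
-- ===== SOURCE B (Python) =====
-- def remove_common_letters(name1, name2):
--     common = sum(min(name1.count(ch), name2.count(ch)) for ch in set(name1))
--     return len(name1) + len(name2) - 2 * common
-- ===== Notes on version B (the rewrite author's own statement) =====
-- stated objective: faster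
-- what changed: Replaces A's quadratic loop that mutates two lists with repeated membership tests and remove() calls by a closed formula: len1+len2-2*sum(min(name1.count(ch),name2.count(ch)) for ch in set(name1)).
import Mathlib
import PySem

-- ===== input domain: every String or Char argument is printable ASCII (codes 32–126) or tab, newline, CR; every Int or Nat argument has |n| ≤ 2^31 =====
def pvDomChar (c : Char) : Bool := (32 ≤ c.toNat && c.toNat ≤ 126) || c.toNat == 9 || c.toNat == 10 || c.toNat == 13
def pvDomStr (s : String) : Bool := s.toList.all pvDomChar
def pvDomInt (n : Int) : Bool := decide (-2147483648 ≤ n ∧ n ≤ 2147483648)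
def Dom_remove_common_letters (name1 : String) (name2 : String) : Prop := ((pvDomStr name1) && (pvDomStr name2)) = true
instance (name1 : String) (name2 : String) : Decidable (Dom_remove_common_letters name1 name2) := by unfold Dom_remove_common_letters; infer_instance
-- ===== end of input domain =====

-- B replaces A's quadratic remove-from-both-lists loop by counting min(count1,count2) over the
-- distinct letters of name1 (faster: O(k*n) vs O(n^2)); return values are proved equal on all inputs.

-- ===== PORT A =====
-- the for-loop over the snapshot name1[:] with its mutable state (name1, name2);
-- 'letter in name2' is l2.contains c; list.remove(x) = List.erase (first occurrence).
-- Python's remove would raise ValueError only if the element were absent, which never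
-- happens here: the letter comes from the snapshot of l1 and is removed at most once per visit.
def pvRemoveLoop : List Char → List Char → List Char → List Char × List Char
  | [], l1, l2 => (l1, l2)
  | c :: rest, l1, l2 =>
    if l2.contains c then pvRemoveLoop rest (l1.erase c) (l2.erase c)
    else pvRemoveLoop rest l1 l2

def remove_common_letters (name1 : String) (name2 : String) : Int :=
  let l1 := name1.toList
  let l2 := name2.toList
  let r := pvRemoveLoop l1 l1 l2
  (r.1.length : Int) + (r.2.length : Int)

-- ===== PORT B =====
-- sum over set(name1) ported as a fold over PySem.Set.ofList (the sum is order-independent)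
def remove_common_letters_alt (name1 : String) (name2 : String) : Int :=
  let l1 := name1.toList
  let l2 := name2.toList
  let common : Nat := (PySem.Set.ofList l1).foldl (fun acc c => acc + min (l1.count c) (l2.count c)) 0
  (l1.length : Int) + (l2.length : Int) - 2 * (common : Int)

-- ===== PRECONDITION & SPEC =====
def Spec_remove_common_letters (name1 : String) (name2 : String) (out : Int) : Prop := out = remove_common_letters_alt name1 name2
instance (name1 : String) (name2 : String) (out : Int) : Decidable (Spec_remove_common_letters name1 name2 out) := by unfold Spec_remove_common_letters; infer_instance

-- ===== CLAIM (what is proved, stated in full; the proofs are below) =====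
def Claim_equal_remove_common_letters : Prop := ∀ (name1 : String) (name2 : String), Dom_remove_common_letters name1 name2 → Spec_remove_common_letters name1 name2 (remove_common_letters name1 name2)

-- ===== LEMMAS AND PROOFS =====

-- A's loop: each kept branch removes one matched letter from each list; the total number of
-- matches starting from snapshot s and pool l2 is the multiset-intersection size card (↑s ∩ ↑l2),
-- provided the working list l1 still holds every letter of the remaining snapshot s.
lemma pvRemoveLoop_lengths (s : List Char) : ∀ (l1 l2 : List Char),
    (∀ d, s.count d ≤ l1.count d) →
    (pvRemoveLoop s l1 l2).1.length + Multiset.card ((↑s : Multiset Char) ∩ ↑l2) = l1.length ∧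
    (pvRemoveLoop s l1 l2).2.length + Multiset.card ((↑s : Multiset Char) ∩ ↑l2) = l2.length := by
  induction s with
  | nil => intro l1 l2 _; simp [pvRemoveLoop]
  | cons c rest ih =>
    intro l1 l2 hcnt
    have hc1 : c ∈ l1 := by
      have := hcnt c
      simp [List.count_cons] at this
      exact List.count_pos_iff.mp (by omega)
    by_cases h2 : l2.contains c = true
    · have hmem : c ∈ l2 := List.mem_of_elem_eq_true h2
      have hinter : ((↑(c :: rest) : Multiset Char) ∩ ↑l2)
          = c ::ₘ ((↑rest : Multiset Char) ∩ (↑l2 : Multiset Char).erase c) := by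
        have : (↑(c :: rest) : Multiset Char) = c ::ₘ (↑rest : Multiset Char) := rfl
        rw [this, Multiset.cons_inter_of_pos _ (by exact_mod_cast hmem)]
      have hcnt' : ∀ d, rest.count d ≤ (l1.erase c).count d := by
        intro d
        have h := hcnt d
        rw [List.count_erase]
        by_cases hdc : d = c <;> simp [List.count_cons, hdc] at h ⊢ <;> omega
      have ihh := ih (l1.erase c) (l2.erase c) hcnt'
      rw [Multiset.coe_erase] at hinter
      simp only [pvRemoveLoop, if_pos h2, hinter, Multiset.card_cons]
      have e1 : (l1.erase c).length = l1.length - 1 := List.length_erase_of_mem hc1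
      have e2 : (l2.erase c).length = l2.length - 1 := List.length_erase_of_mem hmem
      have hl1 : 1 ≤ l1.length := List.length_pos_of_mem hc1
      have hl2 : 1 ≤ l2.length := List.length_pos_of_mem hmem
      omega
    · have hmem : c ∉ l2 := fun h => h2 (List.elem_eq_true_of_mem h)
      have hinter : ((↑(c :: rest) : Multiset Char) ∩ ↑l2)
          = (↑rest : Multiset Char) ∩ (↑l2 : Multiset Char) := by
        have : (↑(c :: rest) : Multiset Char) = c ::ₘ (↑rest : Multiset Char) := rfl
        rw [this, Multiset.cons_inter_of_neg _ (by exact_mod_cast hmem)]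
      have hcnt' : ∀ d, rest.count d ≤ l1.count d := by
        intro d; have h := hcnt d; simp [List.count_cons] at h; omega
      have ihh := ih l1 l2 hcnt'
      simp only [pvRemoveLoop, if_neg h2, hinter]
      omega

-- B's sum over the distinct letters of l1 is the same intersection size.
lemma pvSum_min_eq_card (l1 l2 : List Char) :
    ((PySem.Set.ofList l1).foldl (fun acc c => acc + min (l1.count c) (l2.count c)) 0)
      = Multiset.card ((↑l1 : Multiset Char) ∩ ↑l2) := by
  set u := PySem.Set.ofList l1 with hu
  set S : Multiset Char := (↑l1 : Multiset Char) ∩ ↑l2 with hS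
  have hfold := PySem.List.foldl_add_nat u (fun c => min (l1.count c) (l2.count c)) 0
  rw [hfold]
  have hmap : (u.map fun c => min (l1.count c) (l2.count c)) = u.map (fun c => S.count c) := by
    apply List.map_congr_left
    intro a _
    rw [hS, Multiset.count_inter, Multiset.coe_count, Multiset.coe_count]
  rw [hmap]
  have hnd : u.Nodup := PySem.Set.nodup_ofList l1
  rw [Nat.zero_add, ← List.sum_toFinset _ hnd]
  have hsub : S.toFinset ⊆ u.toFinset := by
    intro a ha
    rw [List.mem_toFinset, hu, PySem.Set.mem_ofList]
    have : a ∈ S := Multiset.mem_toFinset.mp ha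
    have := Multiset.mem_inter.mp (hS ▸ this)
    exact_mod_cast this.1
  rw [← Multiset.toFinset_sum_count_eq S]
  exact (Finset.sum_subset hsub (fun a _ ha =>
    Multiset.count_eq_zero.mpr (fun h => ha (Multiset.mem_toFinset.mpr h)))).symm

-- ===== VERDICT (by name: the statement is the Claim_ definition above) =====
theorem remove_common_letters_spec : Claim_equal_remove_common_letters := by
  intro name1 name2 _
  unfold Spec_remove_common_letters remove_common_letters remove_common_letters_alt
  have hA := pvRemoveLoop_lengths name1.toList name1.toList name2.toList (fun d => le_refl _)
  have hB := pvSum_min_eq_card name1.toList name2.toList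
  simp only []
  omega
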